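-- pv_equiv track=rewrite | github.com/xbgit/FaultTolerance_AACFT | ftcode/algorithms/alg_controller.py | shape2size
-- ===== SOURCE A (Python) =====
-- def shape2size(obs_shape_n, action_shape_n):
--     obs_size = []
--     action_size = []
--     head_o, head_a, end_o, end_a = 0, 0, 0, 0
--     for obs_shape, action_shape in zip(obs_shape_n, action_shape_n):
--         end_o = end_o + obs_shape
--         end_a = end_a + action_shape
--         range_o = (head_o, end_o)
--         range_a = (head_a, end_a)
--         obs_size.append(range_o)
--         action_size.append(range_a)
--         head_o = end_o
--         head_a = end_a
--     return obs_size, action_size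
-- ===== SOURCE B (Python) =====
-- def shape2size(obs_shape_n, action_shape_n):
--     pairs = list(zip(obs_shape_n, action_shape_n))
--
--     def ranges(shapes):
--         bounds = [0]
--         for s in shapes:
--             bounds.append(bounds[-1] + s)
--         return list(zip(bounds, bounds[1:]))
--
--     return ranges([o for o, _ in pairs]), ranges([a for _, a in pairs])
-- ===== Notes on version B (the rewrite author's own statement) =====
-- stated objective: idiomatic
-- what changed: Replaces the interleaved four-accumulator loop by a prefix-boundary table per shape list (truncated by a single zip) paired via zip(bounds, bounds[1:]).
import Mathlib
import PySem

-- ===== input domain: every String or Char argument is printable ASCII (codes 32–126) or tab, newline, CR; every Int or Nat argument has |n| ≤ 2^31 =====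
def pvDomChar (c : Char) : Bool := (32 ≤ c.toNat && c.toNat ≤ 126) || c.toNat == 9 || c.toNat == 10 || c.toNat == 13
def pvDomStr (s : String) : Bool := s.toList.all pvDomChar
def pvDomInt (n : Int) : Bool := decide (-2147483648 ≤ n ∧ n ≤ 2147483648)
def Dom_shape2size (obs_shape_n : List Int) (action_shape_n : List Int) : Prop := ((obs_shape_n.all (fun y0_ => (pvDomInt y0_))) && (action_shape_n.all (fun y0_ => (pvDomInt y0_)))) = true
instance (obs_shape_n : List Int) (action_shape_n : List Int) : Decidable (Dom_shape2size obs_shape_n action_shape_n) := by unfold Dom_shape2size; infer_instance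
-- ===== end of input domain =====

-- B replaces A's interleaved four-accumulator loop by a per-list prefix-boundary
-- table paired with its own tail (more idiomatic decomposition; same cost).

-- ===== PORT A =====
-- state = (obs_size, action_size, head_o, head_a, end_o, end_a), exactly A's loop
def shape2size (obs_shape_n : List Int) (action_shape_n : List Int) : (List (Int × Int)) × (List (Int × Int)) :=
  let st := (List.zip obs_shape_n action_shape_n).foldl
    (fun (st : (List (Int × Int)) × (List (Int × Int)) × Int × Int × Int × Int) p =>
      let (obs_size, action_size, head_o, head_a, end_o, end_a) := st
      let end_o := end_o + p.1
      let end_a := end_a + p.2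
      let range_o := (head_o, end_o)
      let range_a := (head_a, end_a)
      (obs_size ++ [range_o], action_size ++ [range_a], end_o, end_a, end_o, end_a))
    ([], [], 0, 0, 0, 0)
  (st.1, st.2.1)

-- ===== PORT B =====
-- bounds loop of Source B: bounds starts [0], appends bounds[-1] + s (bounds never empty, so getLastD 0 is exact)
def pvBounds (shapes : List Int) : List Int :=
  shapes.foldl (fun bounds s => bounds ++ [bounds.getLastD 0 + s]) [0]

-- ranges(shapes) = list(zip(bounds, bounds[1:])); bounds[1:] on a list = drop 1 (exact for index 1 ≥ 0)
def pvRanges (shapes : List Int) : List (Int × Int) :=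
  let bounds := pvBounds shapes
  List.zip bounds (bounds.drop 1)

def shape2size_alt (obs_shape_n : List Int) (action_shape_n : List Int) : (List (Int × Int)) × (List (Int × Int)) :=
  let pairs := List.zip obs_shape_n action_shape_n
  (pvRanges (pairs.map Prod.fst), pvRanges (pairs.map Prod.snd))

-- ===== PRECONDITION & SPEC =====
def Spec_shape2size (obs_shape_n : List Int) (action_shape_n : List Int) (out : (List (Int × Int)) × (List (Int × Int))) : Prop := out = shape2size_alt obs_shape_n action_shape_n
instance (obs_shape_n : List Int) (action_shape_n : List Int) (out : (List (Int × Int)) × (List (Int × Int))) : Decidable (Spec_shape2size obs_shape_n action_shape_n out) := by unfold Spec_shape2size; infer_instance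

-- ===== CLAIM (what is proved, stated in full; the proofs are below) =====
def Claim_equal_shape2size : Prop := ∀ (obs_shape_n : List Int) (action_shape_n : List Int), Dom_shape2size obs_shape_n action_shape_n → Spec_shape2size obs_shape_n action_shape_n (shape2size obs_shape_n action_shape_n)

-- ===== LEMMAS AND PROOFS =====

-- common reference result: ranges of a shape list starting at c
def pvPairs (c : Int) : List Int → List (Int × Int)
  | [] => []
  | s :: t => (c, c + s) :: pvPairs (c + s) t

-- A's fold, entered with head = end on both components, produces appended pvPairs
theorem shape2size_foldA (l : List (Int × Int)) (os as : List (Int × Int)) (c d : Int) :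
    (l.foldl
      (fun (st : (List (Int × Int)) × (List (Int × Int)) × Int × Int × Int × Int) p =>
        let (obs_size, action_size, head_o, head_a, end_o, end_a) := st
        let end_o := end_o + p.1
        let end_a := end_a + p.2
        (obs_size ++ [(head_o, end_o)], action_size ++ [(head_a, end_a)], end_o, end_a, end_o, end_a))
      (os, as, c, d, c, d)) =
    (os ++ pvPairs c (l.map Prod.fst), as ++ pvPairs d (l.map Prod.snd),
      c + (l.map Prod.fst).sum, d + (l.map Prod.snd).sum,
      c + (l.map Prod.fst).sum, d + (l.map Prod.snd).sum) := by
  induction l generalizing os as c d with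
  | nil => simp [pvPairs]
  | cons p t ih =>
    simp only [List.foldl_cons, List.map_cons, List.sum_cons, pvPairs]
    rw [ih]
    simp [List.append_assoc]
    omega

-- bounds fold, entered with a nonempty prefix ending in c, appends successive sums
def pvBoundsAux (c : Int) : List Int → List Int
  | [] => []
  | s :: t => (c + s) :: pvBoundsAux (c + s) t

theorem pvBounds_fold (l : List Int) (bs : List Int) (c : Int)
    (h : bs.getLastD 0 = c) (hne : bs ≠ []) :
    l.foldl (fun bounds s => bounds ++ [bounds.getLastD 0 + s]) bs = bs ++ pvBoundsAux c l := by
  induction l generalizing bs c with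
  | nil => simp [pvBoundsAux]
  | cons s t ih =>
    simp only [List.foldl_cons, pvBoundsAux]
    rw [h, ih (bs ++ [c + s]) (c + s) (by simp) (by simp), List.append_assoc]
    rfl

theorem pvZip_boundsAux (c : Int) (l : List Int) :
    List.zip (c :: pvBoundsAux c l) (pvBoundsAux c l) = pvPairs c l := by
  induction l generalizing c with
  | nil => simp [pvBoundsAux, pvPairs]
  | cons s t ih => simp [pvBoundsAux, pvPairs, List.zip_cons_cons, ih]

theorem pvRanges_eq (shapes : List Int) : pvRanges shapes = pvPairs 0 shapes := by
  unfold pvRanges pvBounds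
  rw [pvBounds_fold shapes [0] 0 rfl (by simp)]
  simpa using pvZip_boundsAux 0 shapes

-- ===== VERDICT (by name: the statement is the Claim_ definition above) =====
theorem shape2size_spec : Claim_equal_shape2size := by
  intro o a _
  show _ = _
  unfold shape2size shape2size_alt
  rw [shape2size_foldA]
  simp [pvRanges_eq]
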